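-- pv_equiv track=rewrite | github.com/bma2015/ProjectEuler | projecteuler/consecutive_prime_sums.py | find_longest_subsequence
-- ===== SOURCE A (Python) =====
-- def conseq_sequences(li, length):
--     return [li[i:i + length] for i in range(0, len(li)) if len(li[i:i + length]) == length]
--
-- def find_longest_subsequence(prime_set, prime_list, sum_limit):
--     max_prime_summand_subseq = []
--
--     l = len(prime_list)  # length of subsequence
--     while not(max_prime_summand_subseq) and l > 0:
--         cons_prim_summand_subseq_list = conseq_sequences(prime_list, l)
--
--         for subseq in cons_prim_summand_subseq_list:
--             sum_subseq = sum(subseq)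
--
--             if sum_subseq < sum_limit and sum_subseq in prime_set:
--                 max_prime_summand_subseq = subseq
--                 break
--
--         l -= 1
--
--     return max_prime_summand_subseq
-- ===== SOURCE B (Python) =====
-- def find_longest_subsequence(prime_set, prime_list, sum_limit):
--     n = len(prime_list)
--     prefix = [0]
--     s = 0
--     for p in prime_list:
--         s += p
--         prefix.append(s)
--     for l in range(n, 0, -1):
--         for i in range(n - l + 1):
--             w = prefix[i + l] - prefix[i]
--             if w < sum_limit and w in prime_set:
--                 return prime_list[i:i + l]
--     return []
-- ===== Notes on version B (the rewrite author's own statement) =====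
-- stated objective: faster
-- what changed: Replaces materialising every length-l window and summing each (O(n^3)) by one prefix-sum array giving O(1) window sums, scanning lengths descending and returning on the first hit (O(n^2)).
import Mathlib
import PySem

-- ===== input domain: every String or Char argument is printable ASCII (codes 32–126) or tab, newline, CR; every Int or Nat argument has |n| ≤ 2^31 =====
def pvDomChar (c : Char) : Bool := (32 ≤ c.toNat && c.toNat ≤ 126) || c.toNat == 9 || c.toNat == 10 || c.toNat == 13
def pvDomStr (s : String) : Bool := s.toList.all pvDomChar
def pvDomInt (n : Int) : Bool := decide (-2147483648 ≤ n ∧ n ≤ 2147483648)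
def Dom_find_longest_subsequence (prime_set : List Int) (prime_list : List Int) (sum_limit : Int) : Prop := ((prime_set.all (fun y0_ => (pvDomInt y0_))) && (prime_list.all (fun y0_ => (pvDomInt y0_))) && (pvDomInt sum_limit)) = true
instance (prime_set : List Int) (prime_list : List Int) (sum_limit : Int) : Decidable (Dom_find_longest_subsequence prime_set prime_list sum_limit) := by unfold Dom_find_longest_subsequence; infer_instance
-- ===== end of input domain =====

-- B replaces A's per-window slice-and-sum search (O(n^3)) by a prefix-sum array with O(1)
-- window sums (O(n^2)); same return value everywhere.

-- ===== PORT A =====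
def conseq_sequences (li : List Int) (length : Int) : List (List Int) :=
  (PySem.List.pyRange 0 (li.length : Int) 1).filterMap (fun i =>
    let s := PySem.List.slice li (some i) (some (i + length))
    if (s.length : Int) = length then some s else none)

-- the 'for subseq in …: … break' loop of A
def pvAScan (prime_set : List Int) (sum_limit : Int) : List (List Int) → List Int
  | [] => []
  | subseq :: rest =>
    let sum_subseq := subseq.sum
    if sum_subseq < sum_limit ∧ sum_subseq ∈ prime_set then subseq
    else pvAScan prime_set sum_limit rest

-- the 'while not(max…) and l > 0' loop of A, recursing on l
def pvAWhile (prime_set prime_list : List Int) (sum_limit : Int) : Nat → List Int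
  | 0 => []
  | l + 1 =>
    let r := pvAScan prime_set sum_limit (conseq_sequences prime_list ((l : Int) + 1))
    if r = [] then pvAWhile prime_set prime_list sum_limit l else r

def find_longest_subsequence (prime_set : List Int) (prime_list : List Int) (sum_limit : Int) : List Int :=
  pvAWhile prime_set prime_list sum_limit prime_list.length

-- ===== PORT B =====
-- prefix-sum build: state is (prefix, s) as in Source B
def pvBPrefix (prime_list : List Int) : List Int :=
  (prime_list.foldl (fun (st : List Int × Int) p => (st.1 ++ [st.2 + p], st.2 + p)) ([0], 0)).1

-- inner 'for i in range(n - l + 1)' loop: i = current index, c = remaining iterations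
def pvBInner (prime_set : List Int) (sum_limit : Int) (pre prime_list : List Int) (l : Nat) : Nat → Nat → Option (List Int)
  | _, 0 => none
  | i, c + 1 =>
    let w := pre.getD (i + l) 0 - pre.getD i 0
    if w < sum_limit ∧ w ∈ prime_set then some ((prime_list.drop i).take l)
    else pvBInner prime_set sum_limit pre prime_list l (i + 1) c

-- outer 'for l in range(n, 0, -1)' loop, recursing on l
def pvBOuter (prime_set : List Int) (sum_limit : Int) (pre prime_list : List Int) : Nat → List Int
  | 0 => []
  | l + 1 =>
    match pvBInner prime_set sum_limit pre prime_list (l + 1) 0 (prime_list.length - (l + 1) + 1) with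
    | some r => r
    | none => pvBOuter prime_set sum_limit pre prime_list l

def find_longest_subsequence_alt (prime_set : List Int) (prime_list : List Int) (sum_limit : Int) : List Int :=
  pvBOuter prime_set sum_limit (pvBPrefix prime_list) prime_list prime_list.length

-- ===== PRECONDITION & SPEC =====
def Spec_find_longest_subsequence (prime_set : List Int) (prime_list : List Int) (sum_limit : Int) (out : List Int) : Prop := out = find_longest_subsequence_alt prime_set prime_list sum_limit
instance (prime_set : List Int) (prime_list : List Int) (sum_limit : Int) (out : List Int) : Decidable (Spec_find_longest_subsequence prime_set prime_list sum_limit out) := by unfold Spec_find_longest_subsequence; infer_instance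

-- ===== CLAIM (what is proved, stated in full; the proofs are below) =====
def Claim_equal_find_longest_subsequence : Prop := ∀ (prime_set : List Int) (prime_list : List Int) (sum_limit : Int), Dom_find_longest_subsequence prime_set prime_list sum_limit → Spec_find_longest_subsequence prime_set prime_list sum_limit (find_longest_subsequence prime_set prime_list sum_limit)

-- ===== LEMMAS AND PROOFS =====

-- prefix list characterisation
theorem pvBPrefix_fold (xs : List Int) (acc : List Int) (s : Int) :
    xs.foldl (fun (st : List Int × Int) p => (st.1 ++ [st.2 + p], st.2 + p)) (acc, s) =
      (acc ++ (List.range xs.length).map (fun j => s + (xs.take (j + 1)).sum), s + xs.sum) := by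
  induction xs generalizing acc s with
  | nil => simp
  | cons p xs ih =>
    simp only [List.foldl_cons, ih, List.length_cons, List.range_succ_eq_map, List.map_cons,
      List.map_map, List.take_succ_cons, List.sum_cons, List.append_assoc]
    refine Prod.ext ?_ (by push_cast; ring)
    simp only [List.take_zero, List.sum_nil]
    congr 1
    simp only [List.cons_append, List.nil_append]
    congr 1
    · ring
    · exact List.map_congr_left (fun j _ => by simp; ring)

theorem pvBPrefix_eq (xs : List Int) :
    pvBPrefix xs = (List.range (xs.length + 1)).map (fun i => (xs.take i).sum) := by
  unfold pvBPrefix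
  rw [pvBPrefix_fold]
  simp [List.range_succ_eq_map, List.map_map, Function.comp]

theorem pvBPrefix_getD (xs : List Int) (i : Nat) (h : i ≤ xs.length) :
    (pvBPrefix xs).getD i 0 = (xs.take i).sum := by
  rw [pvBPrefix_eq]
  rw [List.getD_eq_getElem?_getD]
  simp [List.getElem?_map, List.getElem?_range (by omega : i < xs.length + 1)]

-- window sum via prefix differences
theorem window_sum (xs : List Int) (i l : Nat) (h : i + l ≤ xs.length) :
    (pvBPrefix xs).getD (i + l) 0 - (pvBPrefix xs).getD i 0 = ((xs.drop i).take l).sum := by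
  rw [pvBPrefix_getD xs (i + l) h, pvBPrefix_getD xs i (by omega)]
  rw [List.take_add, List.sum_append]
  ring

-- filterMap of a '<m' guard over range n
theorem filterMap_range_lt {α : Type} (f : Nat → α) (m n : Nat) :
    (List.range n).filterMap (fun i => if i < m then some (f i) else none) =
      (List.range (min m n)).map f := by
  induction n with
  | zero => simp
  | succ n ih =>
    rw [List.range_succ, List.filterMap_append, ih]
    by_cases h : n < m
    · have h1 : min m (n + 1) = min m n + 1 := by omega
      have h2 : min m n = n := by omega
      simp [h, h2, List.range_succ]
    · have h1 : min m (n + 1) = min m n := by omega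
      simp [h, h1]

-- conseq_sequences in closed form
theorem conseq_eq (xs : List Int) (k : Nat) :
    conseq_sequences xs ((k : Int) + 1) =
      (List.range (xs.length - k)).map (fun i => (xs.drop i).take (k + 1)) := by
  unfold conseq_sequences
  have hr : PySem.List.pyRange 0 (xs.length : Int) 1 = (List.range xs.length).map (fun j : Nat => (j : Int)) := by
    rw [PySem.List.pyRange_one]; norm_num [← List.map_eq_flatMap]
  rw [hr, List.filterMap_map]
  have hstep : ∀ i : Nat,
      ((fun i : Int =>
        let s := PySem.List.slice xs (some i) (some (i + ((k : Int) + 1)))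
        if (s.length : Int) = (k : Int) + 1 then some s else none) ∘ (fun j : Nat => (j : Int))) i =
      (if i < xs.length - k then some ((xs.drop i).take (k + 1)) else none) := by
    intro i
    have hc : ((i : Int) + ((k : Int) + 1)) = (((i + (k + 1) : Nat)) : Int) := by push_cast; ring
    simp only [Function.comp, hc, PySem.List.slice_natCast]
    have ht : (i + (k + 1)) - i = k + 1 := by omega
    rw [ht]
    have hl : ((xs.drop i).take (k + 1)).length = min (k + 1) (xs.length - i) := by simp
    by_cases hik : i < xs.length - k
    · simp [hik, show k < xs.length - i by omega]
    · simp [hik, show ¬ k < xs.length - i by omega]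
  rw [List.filterMap_congr (fun i _ => hstep i), filterMap_range_lt]
  rw [show min (xs.length - k) xs.length = xs.length - k by omega]

-- inner loops agree
theorem inner_eq (ps : List Int) (lim : Int) (xs : List Int) (k : Nat) :
    ∀ (c i : Nat), i + c + k ≤ xs.length →
      pvAScan ps lim ((List.range c).map (fun j => (xs.drop (i + j)).take (k + 1))) =
        (match pvBInner ps lim (pvBPrefix xs) xs (k + 1) i c with
          | some r => r
          | none => []) := by
  intro c
  induction c with
  | zero => intro i _; simp [pvAScan, pvBInner]
  | succ c ih =>
    intro i h
    have hw : (pvBPrefix xs).getD (i + (k + 1)) 0 - (pvBPrefix xs).getD i 0 =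
        ((xs.drop i).take (k + 1)).sum := window_sum xs i (k + 1) (by omega)
    rw [List.range_succ_eq_map, List.map_cons, List.map_map]
    rw [show ((fun j => (xs.drop (i + j)).take (k + 1)) ∘ Nat.succ) = (fun j => (xs.drop (i + 1 + j)).take (k + 1)) from funext (fun j => by simp only [Function.comp, Nat.succ_eq_add_one]; rw [show i + (j + 1) = i + 1 + j from by omega])]
    show pvAScan ps lim ((xs.drop (i + 0)).take (k + 1) :: _) = _
    rw [show i + 0 = i by omega]
    unfold pvAScan pvBInner
    rw [hw]
    by_cases hc : ((xs.drop i).take (k + 1)).sum < lim ∧ ((xs.drop i).take (k + 1)).sum ∈ ps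
    · simp [hc]
    · simp only [if_neg hc]
      exact ih (i + 1) (by omega)

theorem inner_some_ne_nil (ps : List Int) (lim : Int) (xs : List Int) (k : Nat) :
    ∀ (c i : Nat), i + c + k ≤ xs.length →
      ∀ r, pvBInner ps lim (pvBPrefix xs) xs (k + 1) i c = some r → r ≠ [] := by
  intro c
  induction c with
  | zero => intro i _ r hr; simp [pvBInner] at hr
  | succ c ih =>
    intro i h r hr
    simp only [pvBInner] at hr
    rw [window_sum xs i (k + 1) (by omega)] at hr
    split_ifs at hr with hc
    · cases hr
      have : ((xs.drop i).take (k + 1)).length = k + 1 := by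
        simp; omega
      intro hnil
      rw [hnil] at this
      simp at this
    · exact ih (i + 1) (by omega) r hr

theorem outer_eq (ps : List Int) (lim : Int) (xs : List Int) :
    ∀ l, l ≤ xs.length →
      pvAWhile ps xs lim l = pvBOuter ps lim (pvBPrefix xs) xs l := by
  intro l
  induction l with
  | zero => intro _; rfl
  | succ l ih =>
    intro h
    unfold pvAWhile pvBOuter
    rw [conseq_eq xs l]
    have hcnt : xs.length - (l + 1) + 1 = xs.length - l := by omega
    rw [hcnt]
    have he := inner_eq ps lim xs l (xs.length - l) 0 (by omega)
    rw [show (fun i => (xs.drop i).take (l + 1)) = (fun j => (xs.drop (0 + j)).take (l + 1)) from funext (fun j => by rw [Nat.zero_add])]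
    rw [he]
    cases hB : pvBInner ps lim (pvBPrefix xs) xs (l + 1) 0 (xs.length - l) with
    | none => simpa using ih (by omega)
    | some r =>
      have hne : r ≠ [] := inner_some_ne_nil ps lim xs l (xs.length - l) 0 (by omega) r hB
      simp [hne]

-- ===== VERDICT (by name: the statement is the Claim_ definition above) =====
theorem find_longest_subsequence_spec : Claim_equal_find_longest_subsequence := by
  intro ps pl lim _
  unfold Spec_find_longest_subsequence find_longest_subsequence find_longest_subsequence_alt
  exact outer_eq ps lim pl pl.length le_rfl
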